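-- pv_equiv track=rewrite | github.com/daniel-reich/ubiquitous-fiesta | Pf2kDoCRvEL8qzKTs_3.py | order_people
-- ===== SOURCE A (Python) =====
-- def order_people(lst, people):
--   fl = []
--   fltemp = []
--   if people > lst[0]*lst[1]:
--     return 'overcrowded'
--   else:
--     l = [i+1 for i in range(people)] + [0]*(lst[0]*lst[1]-people)
--     for j in range(lst[0]):
--       for k in range(lst[1]):
--         fltemp.append(l[j*lst[1]+k])
--       fl.append(fltemp)
--       fltemp = []
--   return [fl[i][::-1] if i%2 ==1 else fl[i] for i in range(len(fl))]
-- ===== SOURCE B (Python) =====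
-- def order_people(lst, people):
--     rows, cols = lst[0], lst[1]
--     if people > rows * cols:
--         return 'overcrowded'
--     out = []
--     n = 1          # next person number to seat
--     forward = True # seating direction of the current row
--     for _ in range(rows):
--         row = []
--         if forward:
--             for _ in range(cols):
--                 row.append(n if n <= people else 0)
--                 n += 1
--         else:
--             m = n + cols - 1   # the last person of this row sits leftmost
--             for _ in range(cols):
--                 row.append(m if m <= people else 0)
--                 m -= 1
--                 n += 1
--         out.append(row)
--         forward = not forward
--     return out
-- ===== Notes on version B (the rewrite author's own statement) =====
-- stated objective: alternative
-- what changed: B replaces A's three-stage pipeline (build padded flat list, chunk it into rows by index arithmetic, reverse odd rows by slicing) with a single seating walk threading a person counter: even rows are built walking the counter upward, odd rows walking it downward from the row's last seat, so no flat list, no index chunking and no reversal pass exist.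
-- outside the precondition, e.g. on order_people([2, 2], 5): A returns 'overcrowded', B returns 'overcrowded'
import Mathlib
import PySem

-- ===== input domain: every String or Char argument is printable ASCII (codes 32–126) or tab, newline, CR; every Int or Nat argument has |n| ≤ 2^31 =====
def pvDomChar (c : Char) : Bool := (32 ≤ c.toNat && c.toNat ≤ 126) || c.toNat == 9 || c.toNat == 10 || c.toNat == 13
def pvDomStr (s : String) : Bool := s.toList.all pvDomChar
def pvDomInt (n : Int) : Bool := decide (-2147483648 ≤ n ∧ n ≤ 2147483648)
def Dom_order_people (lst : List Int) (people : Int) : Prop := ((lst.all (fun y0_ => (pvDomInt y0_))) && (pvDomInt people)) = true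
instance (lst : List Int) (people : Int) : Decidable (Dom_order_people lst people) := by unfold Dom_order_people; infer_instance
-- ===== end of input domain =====

-- B replaces A's padded-flat-list / chunking / odd-row-reversal pipeline with a single seating
-- walk threading a person counter: even rows walk the counter up, odd rows walk it down from the
-- row's last seat, so no flat list, no index chunking and no reversal pass exist (objective: alternative).

-- ===== PORT A =====
-- A's 'overcrowded' branch returns a string in Python (outside the declared return type); Pre_ excludes it, the port returns [] there.
def order_people (lst : List Int) (people : Int) : List (List Int) :=
  let r := PySem.List.pyGetD lst 0 0
  let c := PySem.List.pyGetD lst 1 0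
  if people > r * c then []
  else
    let l := (PySem.List.pyRange 0 people 1).map (fun i => i + 1) ++ List.replicate (r * c - people).toNat 0
    let fl := (PySem.List.pyRange 0 r 1).foldl (fun fl j =>
      fl ++ [(PySem.List.pyRange 0 c 1).foldl (fun ft k => ft ++ [PySem.List.pyGetD l (j * c + k) 0]) []]) []
    (PySem.List.pyRange 0 (fl.length : Int) 1).map (fun i =>
      if i % 2 == 1 then ((PySem.List.slice? (PySem.List.pyGetD fl i []) none none (-1)).getD [])
      else PySem.List.pyGetD fl i [])

-- ===== PORT B =====
def order_people_alt (lst : List Int) (people : Int) : List (List Int) :=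
  let rows := PySem.List.pyGetD lst 0 0
  let cols := PySem.List.pyGetD lst 1 0
  if people > rows * cols then []
  else
    let fin := (PySem.List.pyRange 0 rows 1).foldl
      (fun (st : List (List Int) × Int × Bool) _ =>
        if st.2.2 then
          let inner := (PySem.List.pyRange 0 cols 1).foldl
            (fun (rs : List Int × Int) _ =>
              (rs.1 ++ [if rs.2 ≤ people then rs.2 else 0], rs.2 + 1))
            ([], st.2.1)
          (st.1 ++ [inner.1], inner.2, false)
        else
          let inner := (PySem.List.pyRange 0 cols 1).foldl
            (fun (rs : List Int × Int × Int) _ =>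
              (rs.1 ++ [if rs.2.1 ≤ people then rs.2.1 else 0], rs.2.1 - 1, rs.2.2 + 1))
            ([], st.2.1 + cols - 1, st.2.1)
          (st.1 ++ [inner.1], inner.2.2, true))
      ([], 1, true)
    fin.1

-- ===== PRECONDITION & SPEC =====
-- Pre_ excludes lst with fewer than 2 elements (A raises IndexError) and people > lst[0]*lst[1],
-- where A returns the string 'overcrowded', which is not a value of the declared List (List Int) type.
def Pre_order_people (lst : List Int) (people : Int) : Prop :=
  2 ≤ lst.length ∧ people ≤ PySem.List.pyGetD lst 0 0 * PySem.List.pyGetD lst 1 0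

instance (lst : List Int) (people : Int) : Decidable (Pre_order_people lst people) := by
  unfold Pre_order_people; infer_instance

def pvWitness_order_people : List Int × Int := ([3, 4], 10)

def Spec_order_people (lst : List Int) (people : Int) (out : List (List Int)) : Prop := out = order_people_alt lst people
instance (lst : List Int) (people : Int) (out : List (List Int)) : Decidable (Spec_order_people lst people out) := by unfold Spec_order_people; infer_instance

-- ===== CLAIM (what is proved, stated in full; the proofs are below) =====
def Claim_equal_order_people : Prop := ∀ (lst : List Int) (people : Int), Dom_order_people lst people → Pre_order_people lst people → Spec_order_people lst people (order_people lst people)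

-- ===== LEMMAS AND PROOFS =====

-- proof-side description of one seated row: value handed to seat n, a forward row, a directed row
def valB (people n : Int) : Int := if n ≤ people then n else 0
def rowB (people : Int) (m : Nat) (n : Int) : List Int := (List.range m).map (fun (k : Nat) => valB people (n + (k : Int)))
def dirRow (people : Int) (m : Nat) (n : Int) (fwd : Bool) : List Int :=
  if fwd then rowB people m n else (rowB people m n).reverse

-- B's forward inner loop seats l.length people left-to-right starting at counter n
theorem innerF (people : Int) (l : List Int) (row : List Int) (n : Int) :
    l.foldl (fun (rs : List Int × Int) _ =>
      (rs.1 ++ [if rs.2 ≤ people then rs.2 else 0], rs.2 + 1)) (row, n)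
    = (row ++ rowB people l.length n, n + l.length) := by
  induction l generalizing row n with
  | nil => simp [rowB]
  | cons a t ih =>
    have hrow : rowB people (t.length + 1) n = valB people n :: rowB people t.length (n + 1) := by
      unfold rowB
      rw [List.range_succ_eq_map, List.map_cons, List.map_map]
      congr 1
      · norm_num
      · apply List.map_congr_left
        intro k _
        simp only [Function.comp_apply]
        congr 1
        push_cast; ring
    simp only [List.foldl_cons]
    rw [show ((row ++ [if n ≤ people then n else 0]) : List Int)
        = row ++ [valB people n] from by simp [valB]]
    rw [ih, List.length_cons, hrow]
    simp [List.append_assoc]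
    omega

-- the values of B's backward walk, read left to right
def rowBrev (people : Int) (m : Nat) (s : Int) : List Int :=
  (List.range m).map (fun (k : Nat) => valB people (s - (k : Int)))

-- B's backward inner loop seats l.length people right-to-left, counter m descending
theorem innerBwd (people : Int) (l : List Int) (row : List Int) (m n : Int) :
    l.foldl (fun (rs : List Int × Int × Int) _ =>
      (rs.1 ++ [if rs.2.1 ≤ people then rs.2.1 else 0], rs.2.1 - 1, rs.2.2 + 1)) (row, m, n)
    = (row ++ rowBrev people l.length m, m - l.length, n + l.length) := by
  induction l generalizing row m n with
  | nil => simp [rowBrev]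
  | cons a t ih =>
    have hrow : rowBrev people (t.length + 1) m = valB people m :: rowBrev people t.length (m - 1) := by
      unfold rowBrev
      rw [List.range_succ_eq_map, List.map_cons, List.map_map]
      congr 1
      · norm_num
      · apply List.map_congr_left
        intro k _
        simp only [Function.comp_apply]
        congr 1
        push_cast; ring
    simp only [List.foldl_cons]
    rw [show ((row ++ [if m ≤ people then m else 0]) : List Int)
        = row ++ [valB people m] from by simp [valB]]
    rw [ih, List.length_cons, hrow]
    simp [List.append_assoc]
    omega

-- the backward walk starting at the row's last seat is the reversed forward row
theorem rowBrev_eq_reverse (people cols n : Int) :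
    rowBrev people (PySem.List.pyRange 0 cols 1).length (n + cols - 1)
    = (rowB people (PySem.List.pyRange 0 cols 1).length n).reverse := by
  apply List.ext_getElem
  · simp [rowBrev, rowB]
  · intro k h1 h2
    simp only [rowBrev, List.length_map, List.length_range, PySem.List.length_pyRange_one] at h1
    simp only [rowBrev, rowB, List.getElem_reverse, List.length_map, List.length_range,
      PySem.List.length_pyRange_one, List.getElem_map, List.getElem_range]
    congr 1
    omega

-- flipping the direction flag flips the parity test one row later
theorem parity_step (fwd : Bool) (j : Nat) :
    Bool.xor fwd (decide ((j + 1) % 2 = 1)) = Bool.xor (!fwd) (decide (j % 2 = 1)) := by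
  rcases Nat.mod_two_eq_zero_or_one j with h | h <;> cases fwd <;> simp [Nat.add_mod, h]

-- B's outer loop: each pass seats one full row in the current direction and flips it
theorem outerB (people cols : Int) (l : List Int) (out : List (List Int)) (n : Int) (fwd : Bool) :
    l.foldl (fun (st : List (List Int) × Int × Bool) _ =>
        if st.2.2 then
          let inner := (PySem.List.pyRange 0 cols 1).foldl
            (fun (rs : List Int × Int) _ =>
              (rs.1 ++ [if rs.2 ≤ people then rs.2 else 0], rs.2 + 1))
            ([], st.2.1)
          (st.1 ++ [inner.1], inner.2, false)
        else
          let inner := (PySem.List.pyRange 0 cols 1).foldl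
            (fun (rs : List Int × Int × Int) _ =>
              (rs.1 ++ [if rs.2.1 ≤ people then rs.2.1 else 0], rs.2.1 - 1, rs.2.2 + 1))
            ([], st.2.1 + cols - 1, st.2.1)
          (st.1 ++ [inner.1], inner.2.2, true)) (out, n, fwd)
    = (out ++ (List.range l.length).map (fun j =>
         dirRow people (PySem.List.pyRange 0 cols 1).length
           (n + ((j * (PySem.List.pyRange 0 cols 1).length : Nat) : Int))
           (Bool.xor fwd (decide (j % 2 = 1)))),
       n + ((l.length * (PySem.List.pyRange 0 cols 1).length : Nat) : Int),
       Bool.xor fwd (decide (l.length % 2 = 1))) := by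
  induction l generalizing out n fwd with
  | nil => simp
  | cons a t ih =>
    have hmap : ∀ fwd : Bool, (List.range (t.length + 1)).map (fun j =>
          dirRow people (PySem.List.pyRange 0 cols 1).length
            (n + ((j * (PySem.List.pyRange 0 cols 1).length : Nat) : Int))
            (Bool.xor fwd (decide (j % 2 = 1))))
        = dirRow people (PySem.List.pyRange 0 cols 1).length n fwd ::
          (List.range t.length).map (fun j =>
            dirRow people (PySem.List.pyRange 0 cols 1).length
              (n + ((PySem.List.pyRange 0 cols 1).length : Int)
                 + ((j * (PySem.List.pyRange 0 cols 1).length : Nat) : Int))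
              (Bool.xor (!fwd) (decide (j % 2 = 1)))) := by
      intro fwd
      rw [List.range_succ_eq_map, List.map_cons, List.map_map]
      congr 1
      · simp
      · apply List.map_congr_left
        intro j _
        simp only [Function.comp_apply]
        rw [show Nat.succ j = j + 1 from rfl, parity_step]
        congr 1
        push_cast; ring
    cases fwd with
    | true =>
      simp only [List.foldl_cons, eq_self_iff_true, if_true]
      rw [innerF people (PySem.List.pyRange 0 cols 1) [] n]
      simp only [List.nil_append]
      rw [show (rowB people (PySem.List.pyRange 0 cols 1).length n)
          = dirRow people (PySem.List.pyRange 0 cols 1).length n true from by simp [dirRow]]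
      rw [ih]
      refine Prod.ext ?_ (Prod.ext ?_ ?_)
      · simp only [List.length_cons]
        rw [hmap true]
        simp [List.append_assoc]
      · simp only [List.length_cons]
        push_cast; ring
      · simp only [List.length_cons]
        exact (parity_step true t.length).symm
    | false =>
      simp only [List.foldl_cons, Bool.false_eq_true, if_false]
      rw [innerBwd people (PySem.List.pyRange 0 cols 1) [] (n + cols - 1) n]
      simp only [List.nil_append]
      rw [rowBrev_eq_reverse people cols n]
      rw [show ((rowB people (PySem.List.pyRange 0 cols 1).length n).reverse)
          = dirRow people (PySem.List.pyRange 0 cols 1).length n false from by simp [dirRow]]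
      rw [ih]
      refine Prod.ext ?_ (Prod.ext ?_ ?_)
      · simp only [List.length_cons]
        rw [hmap false]
        simp [List.append_assoc]
      · simp only [List.length_cons]
        push_cast; ring
      · simp only [List.length_cons]
        exact (parity_step false t.length).symm

-- closed form of B on non-overcrowded input
theorem altB_closed (lst : List Int) (people : Int)
    (hpre : people ≤ PySem.List.pyGetD lst 0 0 * PySem.List.pyGetD lst 1 0) :
    order_people_alt lst people
    = (List.range (PySem.List.pyRange 0 (PySem.List.pyGetD lst 0 0) 1).length).map (fun j =>
        dirRow people (PySem.List.pyRange 0 (PySem.List.pyGetD lst 1 0) 1).length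
          (1 + ((j * (PySem.List.pyRange 0 (PySem.List.pyGetD lst 1 0) 1).length : Nat) : Int))
          (Bool.xor true (decide (j % 2 = 1)))) := by
  simp only [order_people_alt]
  rw [if_neg (by simpa using not_lt.mpr hpre)]
  rw [outerB]
  simp

-- position p of A's padded flat list holds p+1 for p < people and 0 otherwise
theorem cellA (r c people p : Int) (hp : people ≤ r * c) (h0 : 0 ≤ p) (hpr : p < r * c) :
    PySem.List.pyGetD ((PySem.List.pyRange 0 people 1).map (fun i => i + 1) ++ List.replicate (r * c - people).toNat 0) p 0
    = if p < people then p + 1 else 0 := by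
  rw [PySem.List.pyGetD_eq_getElem _ 0 h0 (by simp [PySem.List.length_pyRange_one]; omega)]
  by_cases hc : p < people
  · rw [List.getElem_append_left (by simp [PySem.List.length_pyRange_one]; omega)]
    rw [List.getElem_map, PySem.List.getElem_pyRange_one]
    simp [hc]; omega
  · rw [List.getElem_append_right (by simp [PySem.List.length_pyRange_one]; omega)]
    simp [hc]

theorem idx_bounds (i k r c : Int) (h1 : 0 ≤ i) (h2 : i < r) (h3 : 0 ≤ k) (h4 : k < c) :
    0 ≤ i * c + k ∧ i * c + k < r * c := by
  constructor
  · nlinarith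
  · nlinarith

-- row i of A's chunking phase equals the position-driven row (left-to-right)
theorem row_eq (r c people i : Int) (hp : people ≤ r * c) (h1 : 0 ≤ i) (h2 : i < r) :
    (PySem.List.pyRange 0 c 1).map (fun k =>
        PySem.List.pyGetD ((PySem.List.pyRange 0 people 1).map (fun j => j + 1) ++ List.replicate (r * c - people).toNat 0) (i * c + k) 0)
    = (PySem.List.pyRange 0 c 1).map (fun k => if i * c + k < people then i * c + k + 1 else 0) := by
  apply List.map_congr_left
  intro k hk
  obtain ⟨hk0, hkc⟩ := PySem.List.mem_pyRange_one.mp hk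
  obtain ⟨hb0, hb1⟩ := idx_bounds i k r c h1 h2 hk0 hkc
  exact cellA r c people _ hp hb0 hb1

-- A's row i (before the reversal pass) is the forward seating row starting at 1 + i*cols
theorem chunk_eq_rowB (c people i : Int) (j : Nat) (hij : i = (j : Int)) :
    (PySem.List.pyRange 0 c 1).map (fun k => if i * c + k < people then i * c + k + 1 else 0)
    = rowB people (PySem.List.pyRange 0 c 1).length
        (1 + ((j * (PySem.List.pyRange 0 c 1).length : Nat) : Int)) := by
  apply List.ext_getElem
  · simp [rowB]
  · intro k h1 h2
    simp only [List.length_map, PySem.List.length_pyRange_one] at h1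
    simp only [rowB, List.getElem_map, PySem.List.getElem_pyRange_one, List.getElem_range, valB]
    have hcl : (((PySem.List.pyRange 0 c 1).length : Nat) : Int) = c := by
      simp only [PySem.List.length_pyRange_one]; omega
    have harg : (1 : Int) + ((j * (PySem.List.pyRange 0 c 1).length : Nat) : Int) + (k : Int)
        = i * c + (0 + (k : Int)) + 1 := by
      push_cast
      rw [hcl, ← hij]; ring
    rw [harg]
    generalize i * c + (0 + (k : Int)) = p
    split_ifs <;> omega

theorem main_order_people (lst : List Int) (people : Int)
    (hpre : people ≤ PySem.List.pyGetD lst 0 0 * PySem.List.pyGetD lst 1 0) :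
    order_people lst people = order_people_alt lst people := by
  rw [altB_closed lst people hpre]
  unfold order_people
  set r := PySem.List.pyGetD lst 0 0 with hr
  set c := PySem.List.pyGetD lst 1 0 with hc
  simp only [if_neg (not_lt.mpr hpre)]
  simp only [PySem.List.foldl_append_singleton_eq_map, List.nil_append]
  simp only [List.length_map, PySem.List.length_pyRange_one]
  have hrange : PySem.List.pyRange 0 (((r - 0).toNat : Int)) 1 = PySem.List.pyRange 0 r 1 := by
    rw [PySem.List.pyRange_one, PySem.List.pyRange_one]
    congr 1
  rw [hrange]
  apply List.ext_getElem
  · simp [PySem.List.length_pyRange_one]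
  · intro j h1 h2
    simp only [List.length_map, PySem.List.length_pyRange_one] at h1
    simp only [List.getElem_map, PySem.List.getElem_pyRange_one, List.getElem_range, zero_add]
    have hjr : ((j : Int)) < r := by omega
    rw [PySem.List.pyGetD_map_pyRange_of_nonneg _ r (j : Int) [] (by positivity) hjr]
    rw [PySem.List.slice?_none_none_neg_one]
    simp only [Option.getD_some]
    rw [row_eq r c people (j : Int) hpre (by positivity) hjr]
    rw [chunk_eq_rowB c people (j : Int) j rfl]
    rcases Nat.mod_two_eq_zero_or_one j with h | h
    · have hm : ¬((j : Int) % 2 = 1) := by omega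
      simp [hm, h, dirRow]
    · have hm : ((j : Int) % 2 = 1) := by omega
      simp [hm, h, dirRow]

-- ===== VERDICT (by name: the statement is the Claim_ definition above) =====
theorem order_people_spec : Claim_equal_order_people := by
  intro lst people _ hpre
  exact (main_order_people lst people hpre.2).symm ▸ rfl
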